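-- pv_equiv track=rewrite | github.com/guzhoudiaoke/interesting_algorithm_puzzles_python3 | 15/15.py | solve5
-- ===== SOURCE A (Python) =====
-- def solve5(step, a, b):
--     dp = [[0] * (b+1) for i in range(b+1)]
--     dp[0][0] = 1
--
--     for i in range(b):
--         for j in range(b+1):
--             for k in range(1, step+1):
--                 if j + k <= b:
--                     dp[i+1][j+k] += dp[i][j]
--
--     ans = 0
--     for i in range(0, b+1, 2):
--         ans += dp[i][b]
--
--     return ans
-- ===== SOURCE B (Python) =====
-- def solve5(step, a, b):
--     # Parity-collapsed 1-D DP: e[j] / o[j] = number of compositions of j into an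
--     # even / odd number of parts, each part in 1..step.  O(b*step) instead of A's
--     # O(b^2*step) 2-D table over (number of parts, amount).
--     e = [1]
--     o = [0]
--     for j in range(1, b + 1):
--         se = 0
--         so = 0
--         for k in range(1, step + 1):
--             if k <= j:
--                 se += e[j - k]
--                 so += o[j - k]
--         e.append(so)
--         o.append(se)
--     return e[b]
-- ===== Notes on version B (the rewrite author's own statement) =====
-- stated objective: faster
-- what changed: Replaces the (b+1)x(b+1) table indexed by number of parts with a parity-collapsed 1-D DP keeping only even/odd-parts counts per amount, dropping a whole factor of b.
import Mathlib
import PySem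

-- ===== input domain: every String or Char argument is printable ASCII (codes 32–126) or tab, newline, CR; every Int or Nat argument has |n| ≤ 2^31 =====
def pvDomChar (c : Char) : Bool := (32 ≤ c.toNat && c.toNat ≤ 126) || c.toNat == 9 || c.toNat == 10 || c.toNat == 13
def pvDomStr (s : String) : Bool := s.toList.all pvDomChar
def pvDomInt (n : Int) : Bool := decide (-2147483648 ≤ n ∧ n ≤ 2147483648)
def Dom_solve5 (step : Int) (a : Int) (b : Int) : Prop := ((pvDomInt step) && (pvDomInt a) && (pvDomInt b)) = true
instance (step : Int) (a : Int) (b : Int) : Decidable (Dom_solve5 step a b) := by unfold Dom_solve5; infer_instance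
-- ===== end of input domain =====

-- B replaces A's (b+1)x(b+1) parts-indexed DP table with a parity-collapsed 1-D DP
-- (even/odd-parts counts per amount), an asymptotically faster different algorithm.


-- ===== PORT A =====
-- All dp indices reached inside Pre_ (0 ≤ b) are nonnegative and in range, so the
-- total forms pyGetD/pySetD are exact there.
def solve5 (step : Int) (a : Int) (b : Int) : Int :=
  -- dp = [[0] * (b+1) for i in range(b+1)]
  let dp : List (List Int) :=
    (PySem.List.pyRange 0 (b+1) 1).map (fun _ => List.replicate (b+1).toNat (0 : Int))
  -- dp[0][0] = 1
  let dp := PySem.List.pySetD dp 0 (PySem.List.pySetD (PySem.List.pyGetD dp 0 []) 0 1)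
  -- for i in range(b): for j in range(b+1): for k in range(1, step+1): ...
  let dp :=
    (PySem.List.pyRange 0 b 1).foldl (fun dp i =>
      (PySem.List.pyRange 0 (b+1) 1).foldl (fun dp j =>
        (PySem.List.pyRange 1 (step+1) 1).foldl (fun dp k =>
          if j + k ≤ b then
            PySem.List.pySetD dp (i+1)
              (PySem.List.pySetD (PySem.List.pyGetD dp (i+1) []) (j+k)
                (PySem.List.pyGetD (PySem.List.pyGetD dp (i+1) []) (j+k) 0
                  + PySem.List.pyGetD (PySem.List.pyGetD dp i []) j 0))
          else dp) dp) dp) dp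
  -- ans = 0; for i in range(0, b+1, 2): ans += dp[i][b]
  (PySem.List.pyRange 0 (b+1) 2).foldl
    (fun ans i => ans + PySem.List.pyGetD (PySem.List.pyGetD dp i []) b 0) 0

-- ===== PORT B =====
def solve5_alt (step : Int) (a : Int) (b : Int) : Int :=
  let eo :=
    (PySem.List.pyRange 1 (b+1) 1).foldl (fun (p : List Int × List Int) j =>
      let s :=
        (PySem.List.pyRange 1 (step+1) 1).foldl (fun (s : Int × Int) k =>
          if k ≤ j then
            (s.1 + PySem.List.pyGetD p.1 (j-k) 0, s.2 + PySem.List.pyGetD p.2 (j-k) 0)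
          else s) (0, 0)
      (p.1 ++ [s.2], p.2 ++ [s.1]))
      ([1], [0])
  PySem.List.pyGetD eo.1 b 0

-- ===== PRECONDITION & SPEC =====
-- A raises IndexError (dp[0][0] on an empty dp) when b < 0; Pre_ excludes exactly that.
def Pre_solve5 (step : Int) (a : Int) (b : Int) : Prop := 0 ≤ b
instance (step : Int) (a : Int) (b : Int) : Decidable (Pre_solve5 step a b) := by unfold Pre_solve5; infer_instance
def pvWitness_solve5 : Int × Int × Int := (3, 0, 5)

def Spec_solve5 (step : Int) (a : Int) (b : Int) (out : Int) : Prop := out = solve5_alt step a b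
instance (step : Int) (a : Int) (b : Int) (out : Int) : Decidable (Spec_solve5 step a b out) := by unfold Spec_solve5; infer_instance

-- ===== CLAIM (what is proved, stated in full; the proofs are below) =====
def Claim_equal_solve5 : Prop := ∀ (step : Int) (a : Int) (b : Int), Dom_solve5 step a b → Pre_solve5 step a b → Spec_solve5 step a b (solve5 step a b)

-- ===== LEMMAS AND PROOFS =====

-- getD / set basics -----------------------------------------------------------
theorem getD_set_self {α : Type} (l : List α) (i : Nat) (v d : α) (h : i < l.length) :
    (l.set i v).getD i d = v := by
  simp [List.getD_eq_getElem?_getD, List.getElem?_set, h]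

theorem getD_set_ne {α : Type} (l : List α) (i j : Nat) (v d : α) (h : i ≠ j) :
    (l.set i v).getD j d = l.getD j d := by
  simp [List.getD_eq_getElem?_getD, List.getElem?_set, h]

theorem set_getD_self {α : Type} (l : List α) (i : Nat) (d : α) (h : i < l.length) :
    l.set i (l.getD i d) = l := by
  rw [List.getD_eq_getElem?_getD, List.getElem?_eq_getElem h]
  exact List.set_getElem_self h

theorem getD_replicate {α : Type} (n i : Nat) (x d : α) :
    (List.replicate n x).getD i d = if i < n then x else d := by
  rw [List.getD_eq_getElem?_getD, List.getElem?_replicate]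
  split_ifs <;> rfl

-- the mathematical table: rr s i j = compositions of j into i parts from 1..s ---
def rr (s : Nat) : Nat → Nat → Int
  | 0, j => if j = 0 then 1 else 0
  | i+1, j => ∑ k ∈ Finset.Icc 1 s, if k ≤ j then rr s i (j - k) else 0

theorem rr_zero (s : Nat) : ∀ i j : Nat, j < i → rr s i j = 0 := by
  intro i
  induction i with
  | zero => intro j h; omega
  | succ i ih =>
    intro j h
    simp only [rr]
    apply Finset.sum_eq_zero
    intro k hk
    rw [Finset.mem_Icc] at hk
    split_ifs with hkj
    · exact ih _ (by omega)
    · rfl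

def Ev (s j : Nat) : Int := ∑ i ∈ Finset.range (j+1), if i % 2 = 0 then rr s i j else 0
def Od (s j : Nat) : Int := ∑ i ∈ Finset.range (j+1), if i % 2 = 1 then rr s i j else 0

theorem Ev_zero (s : Nat) : Ev s 0 = 1 := by simp [Ev, rr]
theorem Od_zero (s : Nat) : Od s 0 = 0 := by simp [Od]

theorem parity_sum_succ (s j rm : Nat) :
    (∑ i ∈ Finset.range (j+2), if i % 2 = rm then rr s i (j+1) else 0)
    = ∑ k ∈ Finset.Icc 1 s, (if k ≤ j+1 then
        (∑ i ∈ Finset.range (j+2-k), if (i+1) % 2 = rm then rr s i (j+1-k) else 0) else 0) := by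
  rw [Finset.sum_range_succ']
  have h0 : (if 0 % 2 = rm then rr s 0 (j+1) else 0) = 0 := by
    split_ifs <;> simp [rr]
  rw [h0, add_zero]
  have hterm : ∀ i, (if (i+1) % 2 = rm then rr s (i+1) (j+1) else 0)
      = ∑ k ∈ Finset.Icc 1 s, (if (i+1) % 2 = rm ∧ k ≤ j+1 then rr s i (j+1-k) else 0) := by
    intro i
    by_cases hp : (i+1) % 2 = rm
    · rw [if_pos hp]
      simp only [rr]
      exact Finset.sum_congr rfl (fun k _ => by simp [hp])
    · rw [if_neg hp]
      rw [Finset.sum_eq_zero]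
      intro k _
      simp [hp]
  rw [Finset.sum_congr rfl (fun i _ => hterm i), Finset.sum_comm]
  apply Finset.sum_congr rfl
  intro k hk
  rw [Finset.mem_Icc] at hk
  by_cases hkj : k ≤ j+1
  · rw [if_pos hkj]
    have hstep : ∀ i, (if (i+1) % 2 = rm ∧ k ≤ j+1 then rr s i (j+1-k) else 0)
        = (if (i+1) % 2 = rm then rr s i (j+1-k) else 0) := by
      intro i; simp [hkj]
    rw [Finset.sum_congr rfl (fun i _ => hstep i)]
    have hsub : Finset.range (j+2-k) ⊆ Finset.range (j+1) := fun x hx =>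
      Finset.mem_range.mpr (by have := Finset.mem_range.mp hx; omega)
    refine (Finset.sum_subset hsub ?_).symm
    intro i hi hni
    rw [Finset.mem_range] at hi hni
    have hge : j+2-k ≤ i := by omega
    have hz : rr s i (j+1-k) = 0 := rr_zero s i (j+1-k) (by omega)
    simp [hz]
  · rw [if_neg hkj]
    apply Finset.sum_eq_zero
    intro i _
    simp [hkj]

theorem Ev_succ (s j : Nat) :
    Ev s (j+1) = ∑ k ∈ Finset.Icc 1 s, (if k ≤ j+1 then Od s (j+1-k) else 0) := by
  rw [Ev, parity_sum_succ]
  apply Finset.sum_congr rfl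
  intro k hk
  rw [Finset.mem_Icc] at hk
  by_cases h : k ≤ j+1
  · rw [if_pos h, if_pos h, Od]
    have hr : j+2-k = (j+1-k)+1 := by omega
    rw [hr]
    apply Finset.sum_congr rfl
    intro i _
    have : ((i+1) % 2 = 0) ↔ (i % 2 = 1) := by omega
    simp [this]
  · rw [if_neg h, if_neg h]

theorem Od_succ (s j : Nat) :
    Od s (j+1) = ∑ k ∈ Finset.Icc 1 s, (if k ≤ j+1 then Ev s (j+1-k) else 0) := by
  rw [Od, parity_sum_succ]
  apply Finset.sum_congr rfl
  intro k hk
  rw [Finset.mem_Icc] at hk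
  by_cases h : k ≤ j+1
  · rw [if_pos h, if_pos h, Ev]
    have hr : j+2-k = (j+1-k)+1 := by omega
    rw [hr]
    apply Finset.sum_congr rfl
    intro i _
    have : ((i+1) % 2 = 1) ↔ (i % 2 = 0) := by omega
    simp [this]
  · rw [if_neg h, if_neg h]

-- sums over lists / reindexing -------------------------------------------------
theorem sum_map_range (f : Nat → Int) (n : Nat) :
    ((List.range n).map f).sum = ∑ i ∈ Finset.range n, f i := by
  induction n with
  | zero => simp
  | succ n ih => rw [List.range_succ]; simp [ih, Finset.sum_range_succ]

theorem sum_map_flatMap {α β : Type} (L : List α) (g : α → List β) (v : β → Int) :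
    ((L.flatMap g).map v).sum = (L.map (fun j => ((g j).map v).sum)).sum := by
  induction L with
  | nil => simp
  | cons hd tl ih => simp [List.flatMap_cons, ih]

theorem sum_Icc_one (f : Nat → Int) (s : Nat) :
    ∑ k ∈ Finset.Icc 1 s, f k = ∑ u ∈ Finset.range s, f (u+1) := by
  induction s with
  | zero => simp
  | succ s ih =>
    rw [Finset.sum_Icc_succ_top (by omega), Finset.sum_range_succ, ih]

theorem sum_even (f : Nat → Int) (n : Nat) :
    (∑ i ∈ Finset.range (n+1), if i % 2 = 0 then f i else 0)
    = ∑ m ∈ Finset.range (n/2+1), f (2*m) := by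
  induction n with
  | zero => simp
  | succ n ih =>
    rw [Finset.sum_range_succ, ih]
    by_cases h : (n+1) % 2 = 0
    · rw [if_pos h]
      have h1 : (n+1)/2 + 1 = (n/2 + 1) + 1 := by omega
      have h2 : 2*(n/2+1) = n+1 := by omega
      rw [h1, Finset.sum_range_succ (f := fun m => f (2*m)) (n := n/2+1)]
      congr 1
      show f (n+1) = f (2*(n/2+1))
      rw [h2]
    · rw [if_neg h, add_zero]
      have h1 : (n+1)/2 = n/2 := by omega
      rw [h1]

-- generic loop-shape lemmas ----------------------------------------------------
theorem foldl_foldl {α β σ : Type} (f : σ → α → β → σ) (kl : List β) :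
    ∀ (jl : List α) (init : σ),
    jl.foldl (fun s j => kl.foldl (fun s k => f s j k) s) init
    = (jl.flatMap (fun j => kl.map (fun k => (j, k)))).foldl (fun s p => f s p.1 p.2) init := by
  intro jl
  induction jl with
  | nil => intro init; rfl
  | cons hd tl ih =>
    intro init
    rw [List.foldl_cons, List.flatMap_cons, List.foldl_append, List.foldl_map, ih]

theorem fold_set_row {γ : Type} (P Q : Nat) (hQP : Q ≠ P)
    (F : List (List Int) → γ → List (List Int)) (ψ : List Int → List Int → γ → List Int)
    (hF : ∀ d x, P < d.length → F d x = d.set P (ψ (d.getD P []) (d.getD Q []) x)) :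
    ∀ (L : List γ) (dp : List (List Int)), P < dp.length →
    L.foldl F dp = dp.set P (L.foldl (fun r x => ψ r (dp.getD Q []) x) (dp.getD P [])) := by
  intro L
  induction L with
  | nil =>
    intro dp hP
    rw [List.foldl_nil, List.foldl_nil, set_getD_self _ _ _ hP]
  | cons hd tl ih =>
    intro dp hP
    rw [List.foldl_cons, List.foldl_cons, hF dp hd hP,
        ih _ (by simpa using hP)]
    rw [getD_set_ne _ _ _ _ _ (Ne.symm hQP), getD_set_self _ _ _ _ hP, List.set_set]

theorem addAt_fold {γ : Type} (c : γ → Prop) [DecidablePred c] (pos : γ → Nat) (v : γ → Int)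
    (m : Nat) :
    ∀ (L : List γ) (row : List Int), (∀ p ∈ L, c p → pos p < row.length) →
    (L.foldl (fun r p => if c p then r.set (pos p) (r.getD (pos p) 0 + v p) else r) row).getD m 0
    = row.getD m 0 + (L.map (fun p => if c p ∧ pos p = m then v p else 0)).sum := by
  intro L
  induction L with
  | nil => intro row _; simp
  | cons hd tl ih =>
    intro row hL
    rw [List.foldl_cons, List.map_cons, List.sum_cons]
    by_cases hc : c hd
    · rw [if_pos hc]
      rw [ih _ (by intro p hp hcp; rw [List.length_set]; exact hL p (List.mem_cons_of_mem _ hp) hcp)]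
      by_cases hm : pos hd = m
      · rw [hm, getD_set_self _ _ _ _ (hm ▸ hL hd (List.mem_cons_self) hc)]
        simp [hc, hm, add_assoc]
      · rw [getD_set_ne _ _ _ _ _ hm]
        simp [hc, hm]
    · rw [if_neg hc, ih _ (fun p hp hcp => hL p (List.mem_cons_of_mem _ hp) hcp)]
      simp [hc]

theorem foldl_len_pres {γ : Type} (f : List Int → γ → List Int)
    (hf : ∀ r x, (f r x).length = r.length) :
    ∀ (L : List γ) (r : List Int), (L.foldl f r).length = r.length := by
  intro L
  induction L with
  | nil => intro r; rfl
  | cons hd tl ih => intro r; rw [List.foldl_cons, ih, hf]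

-- A's table, in Nat form -------------------------------------------------------
def dpInit (n : Nat) : List (List Int) :=
  (List.replicate n (List.replicate n (0:Int))).set 0 ((List.replicate n (0:Int)).set 0 1)

def rowF (q : List Int) (bn : Nat) (r : List Int) (p : Nat × Nat) : List Int :=
  if p.1 + (p.2+1) ≤ bn then r.set (p.1 + (p.2+1)) (r.getD (p.1 + (p.2+1)) 0 + q.getD p.1 0) else r

def ops (s bn : Nat) : List (Nat × Nat) :=
  (List.range (bn+1)).flatMap (fun j => (List.range s).map (fun u => (j, u)))

def dpA (s bn : Nat) : Nat → List (List Int)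
  | 0 => dpInit (bn+1)
  | t+1 => (dpA s bn t).set (t+1)
      ((ops s bn).foldl (rowF ((dpA s bn t).getD t []) bn) ((dpA s bn t).getD (t+1) []))

theorem dpA_length (s bn : Nat) : ∀ t, (dpA s bn t).length = bn+1 := by
  intro t
  induction t with
  | zero => simp [dpA, dpInit]
  | succ t ih => simp only [dpA]; rw [List.length_set, ih]

theorem rowF_len (q : List Int) (bn : Nat) (r : List Int) (x : Nat × Nat) :
    (rowF q bn r x).length = r.length := by
  rw [rowF]; split_ifs <;> simp

theorem ops_sum (s bn m : Nat) (hm : m ≤ bn) (q : List Int) :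
    ((ops s bn).map (fun p => if (p.1 + (p.2+1) ≤ bn ∧ p.1 + (p.2+1) = m) then q.getD p.1 0 else 0)).sum
    = ∑ k ∈ Finset.Icc 1 s, (if k ≤ m then q.getD (m-k) 0 else 0) := by
  rw [ops, sum_map_flatMap]
  have hinner : ∀ j : Nat,
      (((List.range s).map (fun u => (j, u))).map
        (fun p : Nat × Nat => if (p.1 + (p.2+1) ≤ bn ∧ p.1 + (p.2+1) = m) then q.getD p.1 0 else 0)).sum
      = ∑ k ∈ Finset.Icc 1 s, (if (j + k ≤ bn ∧ j + k = m) then q.getD j 0 else 0) := by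
    intro j
    rw [List.map_map, sum_map_range, sum_Icc_one]
    rfl
  have hmap : (List.range (bn+1)).map (fun j =>
        (((List.range s).map (fun u => (j, u))).map
          (fun p : Nat × Nat => if (p.1 + (p.2+1) ≤ bn ∧ p.1 + (p.2+1) = m) then q.getD p.1 0 else 0)).sum)
      = (List.range (bn+1)).map (fun j =>
          ∑ k ∈ Finset.Icc 1 s, (if (j + k ≤ bn ∧ j + k = m) then q.getD j 0 else 0)) :=
    List.map_congr_left (fun j _ => hinner j)
  rw [hmap, sum_map_range, Finset.sum_comm]
  apply Finset.sum_congr rfl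
  intro k hk
  rw [Finset.mem_Icc] at hk
  by_cases hkm : k ≤ m
  · rw [if_pos hkm]
    rw [Finset.sum_eq_single_of_mem (m-k) (Finset.mem_range.mpr (by omega))]
    · rw [if_pos (by omega)]
    · intro j _ hne
      rw [if_neg (by omega)]
  · rw [if_neg hkm]
    apply Finset.sum_eq_zero
    intro j _
    rw [if_neg (by omega)]

theorem A_row (s bn m : Nat) (q r0 : List Int) (hr0 : r0.length = bn+1) (hm : m ≤ bn) :
    ((ops s bn).foldl (rowF q bn) r0).getD m 0
    = r0.getD m 0 + ∑ k ∈ Finset.Icc 1 s, (if k ≤ m then q.getD (m-k) 0 else 0) := by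
  rw [← ops_sum s bn m hm q]
  exact addAt_fold (fun p : Nat × Nat => p.1 + (p.2+1) ≤ bn) (fun p => p.1 + (p.2+1))
      (fun p => q.getD p.1 0) m (ops s bn) r0
      (by intro p _ hc; dsimp only at hc ⊢; omega)

theorem dpA_inv (s bn : Nat) : ∀ t, t ≤ bn →
    ((∀ i, i ≤ bn → ((dpA s bn t).getD i []).length = bn+1) ∧
     (∀ i m, i ≤ t → m ≤ bn → ((dpA s bn t).getD i []).getD m 0 = rr s i m) ∧
     (∀ i m, t < i → ((dpA s bn t).getD i []).getD m 0 = 0)) := by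
  intro t
  induction t with
  | zero =>
    intro _
    refine ⟨?_, ?_, ?_⟩
    · intro i hi
      simp only [dpA, dpInit]
      by_cases h0 : i = 0
      · subst h0
        rw [getD_set_self _ _ _ _ (by simp)]
        simp
      · rw [getD_set_ne _ _ _ _ _ (fun h => h0 h.symm), getD_replicate,
            if_pos (Nat.lt_succ_of_le hi)]
        simp
    · intro i m hi hm
      interval_cases i
      simp only [dpA, dpInit]
      rw [getD_set_self _ _ _ _ (by simp)]
      simp only [rr]
      by_cases h0 : m = 0
      · subst h0; rw [getD_set_self _ _ _ _ (by simp), if_pos rfl]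
      · rw [getD_set_ne _ _ _ _ _ (fun h => h0 h.symm), if_neg h0, getD_replicate]
        split_ifs <;> rfl
    · intro i m hi
      simp only [dpA, dpInit]
      rw [getD_set_ne _ _ _ _ _ (by omega), getD_replicate]
      split_ifs with h
      · rw [getD_replicate]
        split_ifs <;> rfl
      · rfl
  | succ t ih =>
    intro ht
    obtain ⟨ih1, ih2, ih3⟩ := ih (by omega)
    have hr0len : ((dpA s bn t).getD (t+1) []).length = bn+1 := ih1 (t+1) ht
    have hnewlen : ((ops s bn).foldl (rowF ((dpA s bn t).getD t []) bn) ((dpA s bn t).getD (t+1) [])).length = bn+1 := by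
      rw [foldl_len_pres _ (rowF_len _ _), hr0len]
    refine ⟨?_, ?_, ?_⟩
    · intro i hi
      simp only [dpA]
      by_cases h : i = t+1
      · subst h
        rw [getD_set_self _ _ _ _ (by rw [dpA_length]; omega)]
        exact hnewlen
      · rw [getD_set_ne _ _ _ _ _ (fun hh => h hh.symm)]
        exact ih1 i hi
    · intro i m hi hm
      simp only [dpA]
      by_cases h : i = t+1
      · subst h
        rw [getD_set_self _ _ _ _ (by rw [dpA_length]; omega)]
        rw [A_row s bn m _ _ hr0len hm]
        rw [ih3 (t+1) m (by omega), zero_add]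
        simp only [rr]
        apply Finset.sum_congr rfl
        intro k hk
        rw [Finset.mem_Icc] at hk
        split_ifs with hkm
        · exact ih2 t (m-k) le_rfl (by omega)
        · rfl
      · rw [getD_set_ne _ _ _ _ _ (fun hh => h hh.symm)]
        exact ih2 i m (by omega) hm
    · intro i m hi
      simp only [dpA]
      rw [getD_set_ne _ _ _ _ _ (by omega)]
      exact ih3 i m (by omega)

-- the py-level triple loop equals dpA ------------------------------------------
theorem body_step (step : Int) (bn t : Nat) (ht : t < bn) (dp : List (List Int))
    (hlen : dp.length = bn+1) :
    (PySem.List.pyRange 0 ((bn:Int)+1) 1).foldl (fun dp j =>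
      (PySem.List.pyRange 1 (step+1) 1).foldl (fun dp k =>
        if j + k ≤ (bn:Int) then
          PySem.List.pySetD dp ((t:Int)+1)
            (PySem.List.pySetD (PySem.List.pyGetD dp ((t:Int)+1) []) (j+k)
              (PySem.List.pyGetD (PySem.List.pyGetD dp ((t:Int)+1) []) (j+k) 0
                + PySem.List.pyGetD (PySem.List.pyGetD dp (t:Int) []) j 0))
        else dp) dp) dp
    = dp.set (t+1) ((ops step.toNat bn).foldl (rowF (dp.getD t []) bn) (dp.getD (t+1) [])) := by
  have hcast : ((t:Int)+1) = (((t+1:Nat)):Int) := by push_cast; ring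
  have hinner : ∀ (d : List (List Int)) (j : Int), t+1 < d.length →
      (PySem.List.pyRange 1 (step+1) 1).foldl (fun d k =>
        if j + k ≤ (bn:Int) then
          PySem.List.pySetD d ((t:Int)+1)
            (PySem.List.pySetD (PySem.List.pyGetD d ((t:Int)+1) []) (j+k)
              (PySem.List.pyGetD (PySem.List.pyGetD d ((t:Int)+1) []) (j+k) 0
                + PySem.List.pyGetD (PySem.List.pyGetD d (t:Int) []) j 0))
        else d) d
      = d.set (t+1) ((PySem.List.pyRange 1 (step+1) 1).foldl (fun r k =>
          if j + k ≤ (bn:Int) then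
            PySem.List.pySetD r (j+k) (PySem.List.pyGetD r (j+k) 0
              + PySem.List.pyGetD (d.getD t []) j 0)
          else r) (d.getD (t+1) [])) := by
    intro d j hd
    apply fold_set_row (t+1) t (by omega)
      _ (fun r q k => if j + k ≤ (bn:Int) then
          PySem.List.pySetD r (j+k) (PySem.List.pyGetD r (j+k) 0 + PySem.List.pyGetD q j 0)
        else r) _ _ _ hd
    intro d' k hd'
    rw [hcast, PySem.List.pySetD_natCast, PySem.List.pyGetD_natCast, PySem.List.pyGetD_natCast]
    dsimp only
    split_ifs with hguard
    · rfl
    · rw [set_getD_self _ _ _ hd']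
  have houter := fold_set_row (γ := Int) (t+1) t (by omega)
    (fun d j => (PySem.List.pyRange 1 (step+1) 1).foldl (fun d k =>
        if j + k ≤ (bn:Int) then
          PySem.List.pySetD d ((t:Int)+1)
            (PySem.List.pySetD (PySem.List.pyGetD d ((t:Int)+1) []) (j+k)
              (PySem.List.pyGetD (PySem.List.pyGetD d ((t:Int)+1) []) (j+k) 0
                + PySem.List.pyGetD (PySem.List.pyGetD d (t:Int) []) j 0))
        else d) d)
    (fun r q j => (PySem.List.pyRange 1 (step+1) 1).foldl (fun r k =>
        if j + k ≤ (bn:Int) then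
          PySem.List.pySetD r (j+k) (PySem.List.pyGetD r (j+k) 0 + PySem.List.pyGetD q j 0)
        else r) r)
    (by intro d j hd; exact hinner d j hd)
    (PySem.List.pyRange 0 ((bn:Int)+1) 1) dp (by omega)
  rw [houter]
  congr 1
  -- now convert the row-level double loop to the ops fold
  have hbn1 : ((bn:Int)+1) = (((bn+1:Nat)):Int) := by push_cast; ring
  rw [hbn1, PySem.List.pyRange_zero_natCast, PySem.List.pyRange_one]
  have hst : ((step+1) - 1).toNat = step.toNat := by omega
  rw [hst]
  have hc2 : ∀ (x y : Nat), ((x:Int) + ((1:Int) + (y:Int))) = (((x + (y+1) : Nat)):Int) := by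
    intro x y; push_cast; ring
  simp only [List.foldl_map, hc2, PySem.List.pySetD_natCast, PySem.List.pyGetD_natCast,
    Nat.cast_le]
  rw [foldl_foldl (fun (r : List Int) (j : Nat) (u : Nat) =>
        if j + (u+1) ≤ bn then r.set (j+(u+1)) (r.getD (j+(u+1)) 0 + (dp.getD t []).getD j 0)
        else r)
      (List.range step.toNat) (List.range (bn+1)) (dp.getD (t+1) [])]
  simp only [ops]
  apply PySem.List.foldl_congr_mem
  intro acc x _
  simp only [rowF]

theorem triple_loop_eq (step : Int) (bn : Nat) :
    ∀ t, t ≤ bn →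
    (List.range t).foldl (fun dp (i : Nat) =>
      (PySem.List.pyRange 0 ((bn:Int)+1) 1).foldl (fun dp j =>
        (PySem.List.pyRange 1 (step+1) 1).foldl (fun dp k =>
          if j + k ≤ (bn:Int) then
            PySem.List.pySetD dp ((i:Int)+1)
              (PySem.List.pySetD (PySem.List.pyGetD dp ((i:Int)+1) []) (j+k)
                (PySem.List.pyGetD (PySem.List.pyGetD dp ((i:Int)+1) []) (j+k) 0
                  + PySem.List.pyGetD (PySem.List.pyGetD dp (i:Int) []) j 0))
          else dp) dp) dp) (dpInit (bn+1))
    = dpA step.toNat bn t := by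
  intro t
  induction t with
  | zero => intro _; rfl
  | succ t ih =>
    intro ht
    rw [List.range_succ, List.foldl_append, ih (by omega), List.foldl_cons, List.foldl_nil]
    rw [body_step step bn t (by omega) _ (dpA_length _ _ _)]
    rfl

-- the inner loop of B ----------------------------------------------------------
theorem inner_fold_B (jn : Nat) (e o : List Int) : ∀ (st : Nat) (p q : Int),
    (List.map (fun (u : Nat) => (1:Int) + (u:Int)) (List.range st)).foldl
      (fun s k => if k ≤ (jn:Int) then
          (s.1 + PySem.List.pyGetD e ((jn:Int) - k) 0, s.2 + PySem.List.pyGetD o ((jn:Int) - k) 0)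
        else s) (p, q)
    = (p + ∑ k ∈ Finset.Icc 1 st, (if k ≤ jn then e.getD (jn - k) 0 else 0),
       q + ∑ k ∈ Finset.Icc 1 st, (if k ≤ jn then o.getD (jn - k) 0 else 0)) := by
  intro st
  induction st with
  | zero => intro p q; simp
  | succ st ih =>
    intro p q
    rw [List.range_succ, List.map_append, List.foldl_append, ih]
    simp only [List.map_cons, List.map_nil, List.foldl_cons, List.foldl_nil]
    have hcast : ((1:Int) + (st:Int)) = (((st+1:Nat)):Int) := by push_cast; ring
    rw [hcast, Finset.sum_Icc_succ_top (by omega : 1 ≤ st+1),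
        Finset.sum_Icc_succ_top (by omega : 1 ≤ st+1)]
    simp only [Nat.cast_le]
    by_cases h : st + 1 ≤ jn
    · rw [if_pos h, if_pos h, if_pos h]
      have hsub : ((jn:Int) - ((st+1:Nat):Int)) = (((jn - (st+1) : Nat)):Int) := by
        push_cast; omega
      rw [hsub, PySem.List.pyGetD_natCast, PySem.List.pyGetD_natCast]
      simp [add_assoc]
    · rw [if_neg h, if_neg h, if_neg h]
      simp

theorem B_fold (step : Int) (bn : Nat) : ∀ t, t ≤ bn →
    (List.range t).foldl (fun (p : List Int × List Int) (u : Nat) =>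
      ((p.1 ++ [((PySem.List.pyRange 1 (step+1) 1).foldl (fun (s : Int × Int) k =>
          if k ≤ ((1:Int) + (u:Int)) then
            (s.1 + PySem.List.pyGetD p.1 (((1:Int) + (u:Int))-k) 0,
             s.2 + PySem.List.pyGetD p.2 (((1:Int) + (u:Int))-k) 0)
          else s) (0, 0)).2]),
       (p.2 ++ [((PySem.List.pyRange 1 (step+1) 1).foldl (fun (s : Int × Int) k =>
          if k ≤ ((1:Int) + (u:Int)) then
            (s.1 + PySem.List.pyGetD p.1 (((1:Int) + (u:Int))-k) 0,
             s.2 + PySem.List.pyGetD p.2 (((1:Int) + (u:Int))-k) 0)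
          else s) (0, 0)).1]))) ([1], [0])
    = ((List.range (t+1)).map (Ev step.toNat), (List.range (t+1)).map (Od step.toNat)) := by
  intro t
  induction t with
  | zero =>
    intro _
    simp [Ev_zero, Od_zero, List.range_succ]
  | succ t ih =>
    intro ht
    rw [List.range_succ, List.foldl_append, ih (by omega), List.foldl_cons, List.foldl_nil]
    have hj : ((1:Int) + (t:Int)) = (((t+1:Nat)):Int) := by push_cast; ring
    have hpr : PySem.List.pyRange 1 (step+1) 1
        = List.map (fun (u : Nat) => (1:Int) + (u:Int)) (List.range step.toNat) := by
      rw [PySem.List.pyRange_one]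
      have : ((step+1) - 1).toNat = step.toNat := by omega
      rw [this]
    rw [hj, hpr, inner_fold_B]
    dsimp only
    have he : ∀ k, 1 ≤ k → k ≤ t+1 →
        ((List.range (t+1)).map (Ev step.toNat)).getD (t+1-k) 0 = Ev step.toNat (t+1-k) := by
      intro k h1 h2
      exact PySem.List.getD_map_range _ _ _ _ (by omega)
    have ho : ∀ k, 1 ≤ k → k ≤ t+1 →
        ((List.range (t+1)).map (Od step.toNat)).getD (t+1-k) 0 = Od step.toNat (t+1-k) := by
      intro k h1 h2
      exact PySem.List.getD_map_range _ _ _ _ (by omega)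
    have hse : (0:Int) + (∑ k ∈ Finset.Icc 1 step.toNat,
        (if k ≤ t+1 then ((List.range (t+1)).map (Ev step.toNat)).getD (t+1-k) 0 else 0))
        = Od step.toNat (t+1) := by
      rw [zero_add, Od_succ]
      apply Finset.sum_congr rfl
      intro k hk
      rw [Finset.mem_Icc] at hk
      split_ifs with h
      · exact he k hk.1 h
      · rfl
    have hso : (0:Int) + (∑ k ∈ Finset.Icc 1 step.toNat,
        (if k ≤ t+1 then ((List.range (t+1)).map (Od step.toNat)).getD (t+1-k) 0 else 0))
        = Ev step.toNat (t+1) := by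
      rw [zero_add, Ev_succ]
      apply Finset.sum_congr rfl
      intro k hk
      rw [Finset.mem_Icc] at hk
      split_ifs with h
      · exact ho k hk.1 h
      · rfl
    rw [hse, hso]
    rw [List.range_succ (n := t+1), List.map_append, List.map_append]
    rfl

-- main characterizations -------------------------------------------------------
theorem solve5_alt_eq (step a : Int) (bn : Nat) :
    solve5_alt step a (bn:Int) = Ev step.toNat bn := by
  simp only [solve5_alt]
  have hpr : PySem.List.pyRange 1 ((bn:Int)+1) 1
      = List.map (fun (u : Nat) => (1:Int) + (u:Int)) (List.range bn) := by
    rw [PySem.List.pyRange_one]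
    have : (((bn:Int)+1) - 1).toNat = bn := by omega
    rw [this]
  rw [hpr]
  simp only [List.foldl_map]
  rw [B_fold step bn bn le_rfl]
  rw [PySem.List.pyGetD_natCast]
  exact PySem.List.getD_map_range _ _ _ _ (by omega)

theorem solve5_eq (step a : Int) (bn : Nat) :
    solve5 step a (bn:Int) = ∑ m ∈ Finset.range (bn/2+1), rr step.toNat (2*m) bn := by
  simp only [solve5]
  -- initial table
  have hinit : PySem.List.pySetD
      ((PySem.List.pyRange 0 ((bn:Int)+1) 1).map (fun _ => List.replicate ((bn:Int)+1).toNat (0:Int))) 0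
      (PySem.List.pySetD (PySem.List.pyGetD
        ((PySem.List.pyRange 0 ((bn:Int)+1) 1).map (fun _ => List.replicate ((bn:Int)+1).toNat (0:Int))) 0 []) 0 1)
      = dpInit (bn+1) := by
    have h1 : ((PySem.List.pyRange 0 ((bn:Int)+1) 1).map (fun _ => List.replicate ((bn:Int)+1).toNat (0:Int)))
        = List.replicate (bn+1) (List.replicate (bn+1) (0:Int)) := by
      rw [List.map_const', PySem.List.length_pyRange_one]
      have h2 : (((bn:Int)+1) - 0).toNat = bn+1 := by omega
      have h3 : ((bn:Int)+1).toNat = bn+1 := by omega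
      rw [h2, h3]
    rw [h1]
    rw [PySem.List.pyGetD_zero, PySem.List.pySetD_of_nonneg _ _ (by norm_num),
        PySem.List.pySetD_of_nonneg _ _ (by norm_num)]
    have h4 : ((0:Int)).toNat = 0 := rfl
    rw [h4, getD_replicate, if_pos (show 0 < bn+1 by omega), dpInit]
  rw [hinit]
  -- outer loop
  rw [PySem.List.pyRange_zero_natCast]
  simp only [List.foldl_map]
  rw [triple_loop_eq step bn bn le_rfl]
  -- final answer loop
  obtain ⟨inv1, inv2, inv3⟩ := dpA_inv step.toNat bn bn le_rfl
  rw [PySem.List.pyRange_of_pos _ _ (by norm_num : (0:Int) < 2)]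
  have hcnt : (if (0:Int) < (bn:Int)+1 then ((((bn:Int)+1) - 0 + 2 - 1)/2).toNat else 0) = bn/2+1 := by
    rw [if_pos (by omega)]
    omega
  rw [hcnt]
  simp only [List.foldl_map]
  rw [PySem.List.foldl_add, zero_add, sum_map_range]
  apply Finset.sum_congr rfl
  intro m hm
  rw [Finset.mem_range] at hm
  dsimp only
  have hc : ((0:Int) + 2 * (m:Int)) = (((2*m : Nat)):Int) := by push_cast; ring
  rw [hc, PySem.List.pyGetD_natCast, PySem.List.pyGetD_natCast]
  exact inv2 (2*m) bn (by omega) le_rfl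

-- ===== VERDICT (by name: the statement is the Claim_ definition above) =====
theorem solve5_spec : Claim_equal_solve5 := by
  intro step a b _ hb
  unfold Spec_solve5
  obtain ⟨bn, rfl⟩ : ∃ bn : Nat, b = (bn:Int) := ⟨b.toNat, (Int.toNat_of_nonneg hb).symm⟩
  rw [solve5_eq, solve5_alt_eq]
  rw [Ev]
  rw [sum_even]
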